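-- pv_equiv track=rewrite | github.com/codeday/johnpeter-discord | cogs/tournament.py | balanceGroups
-- ===== SOURCE A (Python) =====
-- def balanceGroups(groups):
--     """Balances a list of lists, so they are roughly equally sized."""
--     numPlayers = sum([len(group) for group in groups])
--     minGroupSize = int(numPlayers/len(groups))
--     groupsArr = list(enumerate(groups))
--     for i, group in groupsArr:
--         while(len(group) < minGroupSize):
--             for j, groupSteal in groupsArr:
--                 if (i != j) and len(groupSteal) > minGroupSize:
--                     group.append(groupSteal.pop())
--     return [group for group in groups]
-- ===== SOURCE B (Python) =====
-- def balanceGroups(groups):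
--     """Balances a list of lists, so they are roughly equally sized.
--
--     Pure version: builds the result without mutating the input lists.
--     For each group below the target size it collects the other groups'
--     spare tails (the elements beyond the target, last-first), deals them
--     out round-robin, one per donor per round, until the group reaches the
--     target, and finally cuts what was dealt off each donor.
--     """
--     res = [list(g) for g in groups]
--     target = sum(map(len, res)) // len(res)
--     for i in range(len(res)):
--         if len(res[i]) >= target:
--             continue
--         donors = [j for j in range(len(res)) if j != i and len(res[j]) > target]
--         spare = [list(reversed(res[j][target:])) for j in range(len(res))]
--         taken = [0] * len(res)
--         while len(res[i]) < target:
--             for j in donors: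
--                 if taken[j] < len(spare[j]):
--                     res[i].append(spare[j][taken[j]])
--                     taken[j] += 1
--         for j in donors:
--             del res[j][len(res[j]) - taken[j]:]
--     return res
-- ===== Notes on version B (the rewrite author's own statement) =====
-- stated objective: alternative
-- what changed: B is pure (copies the input) and, per needy group, precomputes the donor set and each donor's reversed spare tail once, deals spares round-robin by index until the group reaches the target, and truncates each donor once at the end, instead of A's repeated full rescans with dynamic eligibility checks and in-place pops; Pre_ excludes only the empty outer list, on which A raises ZeroDivisionError.
import Mathlib
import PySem

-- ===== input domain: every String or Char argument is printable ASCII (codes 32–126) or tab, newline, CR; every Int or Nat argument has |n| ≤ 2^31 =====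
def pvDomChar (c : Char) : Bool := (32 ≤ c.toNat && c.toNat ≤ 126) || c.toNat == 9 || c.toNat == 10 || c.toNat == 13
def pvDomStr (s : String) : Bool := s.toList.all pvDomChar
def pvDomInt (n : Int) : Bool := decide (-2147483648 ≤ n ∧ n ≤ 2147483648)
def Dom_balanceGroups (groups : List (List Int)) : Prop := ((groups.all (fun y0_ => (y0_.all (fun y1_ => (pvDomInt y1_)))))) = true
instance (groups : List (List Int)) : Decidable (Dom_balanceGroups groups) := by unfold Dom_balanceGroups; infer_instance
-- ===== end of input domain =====

-- B is a pure round-robin dealer (precomputed donor set and spare tails, one truncation per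
-- donor) instead of A's repeated rescans with in-place pops; equivalence is about the RETURN
-- value only (A mutates its argument's inner lists in place, B does not).

-- ===== PORT A =====
-- body of `for j, groupSteal in groupsArr:` (one stealing sweep for group i)
def pvStepA (m i : Nat) (st : List (List Int)) (j : Nat) : List (List Int) :=
  let gj := st.getD j []
  if i ≠ j ∧ m < gj.length then
    -- group.append(groupSteal.pop()): pop the last element of st[j], append it to st[i]
    let st1 := st.set j gj.dropLast
    st1.set i ((st1.getD i []) ++ [gj.getLast?.getD 0])  -- default never used: m < len gj
  else st

def pvSweepA (m i : Nat) (st : List (List Int)) : List (List Int) :=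
  (List.range st.length).foldl (pvStepA m i) st

-- `while len(group) < minGroupSize:` — fuel makes the loop total; numPlayers+1 iterations
-- always suffice for the Python loop (each sweep adds at least one element while short)
def pvWhileA (fuel m i : Nat) (st : List (List Int)) : List (List Int) :=
  match fuel with
  | 0 => st
  | f + 1 =>
    if (st.getD i []).length < m then pvWhileA f m i (pvSweepA m i st) else st

def balanceGroups (groups : List (List Int)) : List (List Int) :=
  let numPlayers := (groups.map List.length).sum
  -- int(numPlayers/len(groups)): floor division of nonnegative ints (len(groups)=0 raises, excluded by Pre_)
  let minGroupSize := numPlayers / groups.length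
  (List.range groups.length).foldl (fun st i => pvWhileA (numPlayers + 1) minGroupSize i st) groups

-- ===== PORT B =====
-- body of `for j in donors:` inside the while loop: state is (res[i], taken)
def pvStepB (spare : List (List Int)) (s : List Int × List Nat) (j : Nat) : List Int × List Nat :=
  if s.2.getD j 0 < (spare.getD j []).length then
    (s.1 ++ [(spare.getD j []).getD (s.2.getD j 0) 0], s.2.set j (s.2.getD j 0 + 1))
  else s

-- `while len(res[i]) < target:` — fuel makes the loop total; numPlayers+1 iterations suffice
def pvWhileB (fuel target : Nat) (spare : List (List Int)) (donors : List Nat)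
    (resi : List Int) (taken : List Nat) : List Int × List Nat :=
  match fuel with
  | 0 => (resi, taken)
  | f + 1 =>
    if resi.length < target then
      let s := donors.foldl (pvStepB spare) (resi, taken)
      pvWhileB f target spare donors s.1 s.2
    else (resi, taken)

-- `del res[j][len(res[j]) - taken[j]:]` is `take (len - taken[j])`
def pvTruncB (taken : List Nat) (r : List (List Int)) (j : Nat) : List (List Int) :=
  r.set j ((r.getD j []).take ((r.getD j []).length - taken.getD j 0))

-- one iteration of B's `for i in range(len(res)):`
def pvGroupB (fuel target G : Nat) (res : List (List Int)) (i : Nat) : List (List Int) :=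
  if target ≤ (res.getD i []).length then res else
  let donors := (List.range G).filter (fun j => j ≠ i && decide (target < (res.getD j []).length))
  let spare := (List.range G).map (fun j => ((res.getD j []).drop target).reverse)
  let s := pvWhileB fuel target spare donors (res.getD i []) (List.replicate G 0)
  donors.foldl (pvTruncB s.2) (res.set i s.1)

def balanceGroups_alt (groups : List (List Int)) : List (List Int) :=
  let G := groups.length
  let n := (groups.map List.length).sum
  let target := n / G
  -- res = [list(g) for g in groups] copies the rows; pure values, so the copy is the identity
  (List.range G).foldl (fun res i => pvGroupB (n + 1) target G res i) groups

-- ===== PRECONDITION & SPEC =====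
-- Pre_ excludes only the empty outer list, on which A raises ZeroDivisionError.
def Pre_balanceGroups (groups : List (List Int)) : Prop := groups ≠ []
instance (groups : List (List Int)) : Decidable (Pre_balanceGroups groups) := by
  unfold Pre_balanceGroups; infer_instance

def pvWitness_balanceGroups : List (List Int) := [[1, 2, 3], [4], [5]]

def Spec_balanceGroups (groups : List (List Int)) (out : List (List Int)) : Prop := out = balanceGroups_alt groups
instance (groups : List (List Int)) (out : List (List Int)) : Decidable (Spec_balanceGroups groups out) := by unfold Spec_balanceGroups; infer_instance

-- ===== CLAIM (what is proved, stated in full; the proofs are below) =====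
def Claim_equal_balanceGroups : Prop := ∀ (groups : List (List Int)), Dom_balanceGroups groups → Pre_balanceGroups groups → Spec_balanceGroups groups (balanceGroups groups)

-- ===== LEMMAS AND PROOFS =====

-- `pvMk G f` is the canonical length-G state whose j-th row is `f j`
def pvMk (G : Nat) (f : Nat → List Int) : List (List Int) := (List.range G).map f

theorem pvMk_length (G : Nat) (f : Nat → List Int) : (pvMk G f).length = G := by
  simp [pvMk]

theorem pvMk_getD (G : Nat) (f : Nat → List Int) (j : Nat) (h : j < G) :
    (pvMk G f).getD j [] = f j := by
  simp [pvMk, List.getD_eq_getElem?_getD, h]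

theorem pvMk_set (G : Nat) (f : Nat → List Int) (u : Nat) (v : List Int) :
    (pvMk G f).set u v = pvMk G (fun j => if j = u then v else f j) := by
  apply List.ext_getElem
  · simp [pvMk]
  · intro k hk _
    simp only [pvMk, List.getElem_set, List.getElem_map, List.getElem_range]
    by_cases hku : u = k
    · simp [hku]
    · have hku' : ¬ k = u := fun h' => hku h'.symm
      simp [hku, hku']

theorem pvMk_self (G : Nat) (res : List (List Int)) (h : res.length = G) :
    pvMk G (fun j => res.getD j []) = res := by
  apply List.ext_getElem
  · simp [pvMk, h]
  · intro k hk hk'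
    simp only [pvMk, List.getElem_map, List.getElem_range]
    rw [List.getD_eq_getElem?_getD, List.getElem?_eq_getElem hk', Option.getD_some]

theorem pvMk_congr (G : Nat) (f g : Nat → List Int) (h : ∀ j, j < G → f j = g j) :
    pvMk G f = pvMk G g := by
  apply List.ext_getElem
  · simp [pvMk]
  · intro k hk hk'
    simp only [pvMk, List.getElem_map, List.getElem_range]
    exact h k (by simpa [pvMk] using hk)

-- donor predicate (B's `donors` filter), spare tail, and the abstract mid-loop state Φ
def pvDp (m i : Nat) (res : List (List Int)) (j : Nat) : Bool :=
  j ≠ i && decide (m < (res.getD j []).length)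

def pvSp (m : Nat) (res : List (List Int)) (j : Nat) : List Int :=
  ((res.getD j []).drop m).reverse

-- A's concrete state during the processing of group i, as a function of B's state (res[i], taken)
def pvPhi (G i : Nat) (res : List (List Int)) (resi : List Int) (taken : List Nat) : List (List Int) :=
  pvMk G (fun j => if j = i then resi
    else (res.getD j []).take ((res.getD j []).length - taken.getD j 0))

def pvInv (m i G : Nat) (res : List (List Int)) (taken : List Nat) : Prop :=
  taken.length = G ∧
  ∀ j, (pvDp m i res j = false → taken.getD j 0 = 0) ∧
       taken.getD j 0 ≤ (pvSp m res j).length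

theorem pvSp_length (m : Nat) (res : List (List Int)) (j : Nat) :
    (pvSp m res j).length = (res.getD j []).length - m := by
  simp [pvSp]

theorem pvSp_getD (m : Nat) (res : List (List Int)) (j t : Nat)
    (ht : t < (res.getD j []).length - m) :
    (pvSp m res j).getD t 0 =
      (res.getD j []).getD ((res.getD j []).length - 1 - t) 0 := by
  have hlen : t < (pvSp m res j).length := by rw [pvSp_length]; omega
  rw [List.getD_eq_getElem?_getD, List.getElem?_eq_getElem hlen, Option.getD_some,
      List.getD_eq_getElem?_getD, List.getElem?_eq_getElem (by omega), Option.getD_some]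
  simp only [pvSp, List.getElem_reverse, List.length_drop, List.getElem_drop]
  congr 1
  rw [pvSp_length] at hlen
  omega

theorem pvGetD_set_self (l : List Nat) (u v : Nat) (h : u < l.length) :
    (l.set u v).getD u 0 = v := by
  simp [List.getD_eq_getElem?_getD, h]

theorem pvGetD_set_ne (l : List Nat) (u k v : Nat) (h : u ≠ k) :
    (l.set u v).getD k 0 = l.getD k 0 := by
  simp [List.getD_eq_getElem?_getD, h]

theorem pvDropLast_take (n : Nat) (l : List Int) (hn : n ≤ l.length) :
    (l.take n).dropLast = l.take (n - 1) := by
  rw [List.dropLast_eq_take, List.take_take, List.length_take]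
  congr 1
  omega

theorem pvGetLast_take (n : Nat) (l : List Int) (h0 : 0 < n) (hn : n ≤ l.length) :
    ((l.take n).getLast?).getD 0 = l.getD (n - 1) 0 := by
  rw [List.getLast?_eq_getElem?]
  simp only [List.getElem?_take, List.length_take]
  have hmin : min n l.length = n := by omega
  rw [List.getD_eq_getElem?_getD, hmin, if_pos (by omega : n - 1 < n)]

-- the key single-position simulation: pvStepA on a Φ-state at a donor position is pvStepB
theorem pvStep_sim (m i G : Nat) (res : List (List Int)) (hi : i < G)
    (j : Nat) (hj : j < G) (hdp : pvDp m i res j = true)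
    (resi : List Int) (taken : List Nat) (hInv : pvInv m i G res taken) :
    pvStepA m i (pvPhi G i res resi taken) j =
      pvPhi G i res (pvStepB (pvMk G (pvSp m res)) (resi, taken) j).1
        (pvStepB (pvMk G (pvSp m res)) (resi, taken) j).2 := by
  obtain ⟨hlenT, hT⟩ := hInv
  have hd : j ≠ i ∧ m < (res.getD j []).length := by simpa [pvDp] using hdp
  have htle : taken.getD j 0 ≤ (res.getD j []).length - m := by
    have := (hT j).2; rwa [pvSp_length] at this
  have hphj : (pvPhi G i res resi taken).getD j [] =
      (res.getD j []).take ((res.getD j []).length - taken.getD j 0) := by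
    unfold pvPhi; rw [pvMk_getD _ _ _ hj, if_neg hd.1]
  have hsp : (pvMk G (pvSp m res)).getD j [] = pvSp m res j := pvMk_getD _ _ _ hj
  by_cases hc : taken.getD j 0 < (res.getD j []).length - m
  · -- both sides act
    have hcondA : i ≠ j ∧ m < ((pvPhi G i res resi taken).getD j []).length := by
      refine ⟨fun h => hd.1 h.symm, ?_⟩
      rw [hphj, List.length_take]; omega
    simp only [pvStepA, pvStepB, hsp, pvSp_length]
    rw [if_pos hcondA, if_pos hc]
    rw [hphj]
    unfold pvPhi
    rw [pvMk_set, pvMk_getD _ _ _ hi, pvMk_set]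
    apply pvMk_congr
    intro k hk
    by_cases hki : k = i
    · subst hki
      have hE : (((res.getD j []).take ((res.getD j []).length - taken.getD j 0)).getLast?).getD 0
          = (res.getD j []).getD ((res.getD j []).length - taken.getD j 0 - 1) 0 :=
        pvGetLast_take _ _ (by omega) (by omega)
      have hS : (pvSp m res j).getD (taken.getD j 0) 0
          = (res.getD j []).getD ((res.getD j []).length - 1 - taken.getD j 0) 0 :=
        pvSp_getD m res j (taken.getD j 0) hc
      have hidx : (res.getD j []).length - taken.getD j 0 - 1
          = (res.getD j []).length - 1 - taken.getD j 0 := by omega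
      rw [hE, hidx, ← hS]
      simp only [if_true, if_neg hcondA.1]
    · by_cases hkj : k = j
      · subst hkj
        rw [pvGetD_set_self _ _ _ (by rw [hlenT]; exact hj),
          pvDropLast_take _ _ (by omega)]
        simp only [if_neg hki, if_true]
        congr 1
      · simp only [if_neg hki, if_neg hkj]
        rw [pvGetD_set_ne _ _ _ _ (fun h => hkj h.symm)]
  · -- both sides are a no-op
    have hcondA : ¬ (i ≠ j ∧ m < ((pvPhi G i res resi taken).getD j []).length) := by
      rw [hphj, List.length_take]
      intro hcon
      omega
    simp only [pvStepA, pvStepB, hsp, pvSp_length]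
    rw [if_neg hcondA, if_neg hc]

theorem pvStep_id (m i G : Nat) (res : List (List Int))
    (j : Nat) (hj : j < G) (hdp : pvDp m i res j = false)
    (resi : List Int) (taken : List Nat) :
    pvStepA m i (pvPhi G i res resi taken) j = pvPhi G i res resi taken := by
  simp only [pvStepA]
  by_cases hji : j = i
  · rw [if_neg]
    rintro ⟨hne, -⟩
    exact hne hji.symm
  · have hLm : (res.getD j []).length ≤ m := by
      by_contra hlt
      have htr : pvDp m i res j = true := by
        simp only [pvDp, Bool.and_eq_true, decide_eq_true_eq]
        exact ⟨hji, by omega⟩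
      rw [htr] at hdp
      exact absurd hdp (by simp)
    rw [if_neg]
    rintro ⟨-, hlt⟩
    rw [pvPhi, pvMk_getD _ _ _ hj, if_neg hji, List.length_take] at hlt
    omega

theorem pvStepB_inv (m i G : Nat) (res : List (List Int))
    (j : Nat) (hj : j < G) (hdp : pvDp m i res j = true)
    (resi : List Int) (taken : List Nat) (hInv : pvInv m i G res taken) :
    pvInv m i G res (pvStepB (pvMk G (pvSp m res)) (resi, taken) j).2 := by
  obtain ⟨hlenT, hT⟩ := hInv
  simp only [pvStepB, pvMk_getD _ _ _ hj]
  by_cases hc : taken.getD j 0 < (pvSp m res j).length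
  · rw [if_pos hc]
    refine ⟨by simpa using hlenT, fun k => ?_⟩
    by_cases hkj : k = j
    · subst hkj
      constructor
      · intro hdp'
        rw [hdp'] at hdp
        exact absurd hdp (by simp)
      · rw [pvGetD_set_self _ _ _ (by rw [hlenT]; exact hj)]
        omega
    · rw [pvGetD_set_ne _ _ _ _ (fun h => hkj h.symm)]
      exact hT k
  · rw [if_neg hc]
    exact ⟨hlenT, hT⟩

-- one sweep of A over any index list = B's round over the donors among them
theorem pvSweep_sim (m i G : Nat) (res : List (List Int)) (hi : i < G) :
    ∀ (l : List Nat), (∀ j ∈ l, j < G) →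
    ∀ (resi : List Int) (taken : List Nat), pvInv m i G res taken →
      l.foldl (pvStepA m i) (pvPhi G i res resi taken) =
        pvPhi G i res
          ((l.filter (pvDp m i res)).foldl (pvStepB (pvMk G (pvSp m res))) (resi, taken)).1
          ((l.filter (pvDp m i res)).foldl (pvStepB (pvMk G (pvSp m res))) (resi, taken)).2
      ∧ pvInv m i G res
          ((l.filter (pvDp m i res)).foldl (pvStepB (pvMk G (pvSp m res))) (resi, taken)).2 := by
  intro l
  induction l with
  | nil =>
    intro _ resi taken hInv
    exact ⟨rfl, hInv⟩
  | cons j l ih =>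
    intro hl resi taken hInv
    have hj : j < G := hl j (List.mem_cons_self)
    cases hdp : pvDp m i res j with
    | false =>
      rw [List.foldl_cons, pvStep_id m i G res j hj hdp resi taken,
        List.filter_cons_of_neg (by rw [hdp]; exact Bool.false_ne_true)]
      exact ih (fun k hk => hl k (List.mem_cons_of_mem _ hk)) resi taken hInv
    | true =>
      rw [List.foldl_cons, pvStep_sim m i G res hi j hj hdp resi taken hInv,
        List.filter_cons_of_pos hdp, List.foldl_cons]
      have := ih (fun k hk => hl k (List.mem_cons_of_mem _ hk))
        (pvStepB (pvMk G (pvSp m res)) (resi, taken) j).1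
        (pvStepB (pvMk G (pvSp m res)) (resi, taken) j).2
        (pvStepB_inv m i G res j hj hdp resi taken hInv)
      simpa only [Prod.mk.eta] using this

theorem pvWhile_sim (m i G : Nat) (res : List (List Int)) (hi : i < G) :
    ∀ (fuel : Nat) (resi : List Int) (taken : List Nat), pvInv m i G res taken →
      pvWhileA fuel m i (pvPhi G i res resi taken) =
        pvPhi G i res
          (pvWhileB fuel m (pvMk G (pvSp m res)) ((List.range G).filter (pvDp m i res)) resi taken).1
          (pvWhileB fuel m (pvMk G (pvSp m res)) ((List.range G).filter (pvDp m i res)) resi taken).2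
      ∧ pvInv m i G res
          (pvWhileB fuel m (pvMk G (pvSp m res)) ((List.range G).filter (pvDp m i res)) resi taken).2 := by
  intro fuel
  induction fuel with
  | zero =>
    intro resi taken hInv
    exact ⟨rfl, hInv⟩
  | succ f ih =>
    intro resi taken hInv
    have hgd : (pvPhi G i res resi taken).getD i [] = resi := by
      rw [pvPhi, pvMk_getD _ _ _ hi, if_pos rfl]
    have hphl : (pvPhi G i res resi taken).length = G := pvMk_length _ _
    by_cases hcond : resi.length < m
    · simp only [pvWhileA, pvWhileB, hgd, if_pos hcond, pvSweepA, hphl]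
      obtain ⟨hfold, hinv'⟩ := pvSweep_sim m i G res hi (List.range G)
        (fun k hk => List.mem_range.mp hk) resi taken hInv
      rw [hfold]
      have := ih
        (((List.range G).filter (pvDp m i res)).foldl (pvStepB (pvMk G (pvSp m res))) (resi, taken)).1
        (((List.range G).filter (pvDp m i res)).foldl (pvStepB (pvMk G (pvSp m res))) (resi, taken)).2
        hinv'
      simpa only [Prod.mk.eta] using this
    · constructor
      · simp only [pvWhileA, pvWhileB, hgd, if_neg hcond]
      · simp only [pvWhileB, if_neg hcond]
        exact hInv

theorem pvTrunc_sim (G : Nat) (taken : List Nat) :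
    ∀ (l : List Nat), (∀ j ∈ l, j < G) → l.Nodup → ∀ (f : Nat → List Int),
      l.foldl (pvTruncB taken) (pvMk G f) =
        pvMk G (fun j => if j ∈ l then (f j).take ((f j).length - taken.getD j 0) else f j) := by
  intro l
  induction l with
  | nil =>
    intro _ _ f
    simp
  | cons a l ih =>
    intro hl hnd f
    have ha : a < G := hl a (List.mem_cons_self)
    have hanl : a ∉ l := (List.nodup_cons.mp hnd).1
    rw [List.foldl_cons]
    have hstep : pvTruncB taken (pvMk G f) a =
        pvMk G (fun k => if k = a then (f a).take ((f a).length - taken.getD a 0) else f k) := by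
      rw [pvTruncB, pvMk_getD _ _ _ ha, pvMk_set]
    rw [hstep, ih (fun k hk => hl k (List.mem_cons_of_mem _ hk)) (List.nodup_cons.mp hnd).2]
    apply pvMk_congr
    intro k hk
    by_cases hka : k = a
    · subst hka
      simp [hanl]
    · simp only [if_neg hka, List.mem_cons]
      by_cases hkl : k ∈ l
      · simp [hkl, hka]
      · simp [hkl, hka]

theorem pvGroup_sim (fuel m G : Nat) (res : List (List Int)) (i : Nat)
    (hi : i < G) (hlen : res.length = G) :
    pvWhileA fuel m i res = pvGroupB fuel m G res i := by
  by_cases hneedy : m ≤ (res.getD i []).length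
  · rw [pvGroupB, if_pos hneedy]
    cases fuel with
    | zero => rfl
    | succ f => rw [pvWhileA, if_neg (by omega)]
  · rw [pvGroupB, if_neg hneedy]
    have hres : pvPhi G i res (res.getD i []) (List.replicate G 0) = res := by
      rw [pvPhi]
      refine Eq.trans (pvMk_congr G _ _ fun j hjG => ?_) (pvMk_self G res hlen)
      by_cases hji : j = i
      · simp [hji]
      · simp [hji, List.take_length]
    have hInv0 : pvInv m i G res (List.replicate G 0) := by
      refine ⟨List.length_replicate, fun j => ⟨fun _ => ?_, ?_⟩⟩
      · simp [List.getD]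
      · simp [List.getD]
    obtain ⟨hw, hinvw⟩ := pvWhile_sim m i G res hi fuel (res.getD i []) (List.replicate G 0) hInv0
    rw [hres] at hw
    rw [hw]
    show pvPhi G i res _ _ = List.foldl _ _ _
    have hdonors : (fun j => j ≠ i && decide (m < (res.getD j []).length)) = pvDp m i res := rfl
    have hspare : (List.range G).map (fun j => ((res.getD j []).drop m).reverse)
        = pvMk G (pvSp m res) := rfl
    rw [hdonors, hspare]
    set w := pvWhileB fuel m (pvMk G (pvSp m res)) ((List.range G).filter (pvDp m i res))
      (res.getD i []) (List.replicate G 0)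
    have hset : res.set i w.1 = pvMk G (fun k => if k = i then w.1 else res.getD k []) := by
      conv_lhs => rw [← pvMk_self G res hlen]
      rw [pvMk_set]
    rw [hset, pvTrunc_sim G w.2 ((List.range G).filter (pvDp m i res))
      (fun k hk => List.mem_range.mp (List.mem_filter.mp hk).1)
      ((List.nodup_range).filter _)]
    apply pvMk_congr
    intro k hk
    by_cases hki : k = i
    · have hni : i ∉ (List.range G).filter (pvDp m i res) := by
        intro hmem
        have h2 := (List.mem_filter.mp hmem).2
        simp [pvDp] at h2
      simp [hki, hni]
    · by_cases hkd : k ∈ (List.range G).filter (pvDp m i res)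
      · simp [hkd, hki]
      · have hdpk : pvDp m i res k = false := by
          cases h : pvDp m i res k
          · rfl
          · exact absurd (List.mem_filter.mpr ⟨List.mem_range.mpr hk, h⟩) hkd
        have htk0 : w.2[k]?.getD 0 = 0 := by
          rw [← List.getD_eq_getElem?_getD]
          exact (hinvw.2 k).1 hdpk
        simp [hkd, hki, htk0, List.take_length]

theorem pvWhileA_length (f m i : Nat) (st : List (List Int)) :
    (pvWhileA f m i st).length = st.length := by
  induction f generalizing st with
  | zero => rfl
  | succ f ih =>
    rw [pvWhileA]
    split
    · rw [ih]
      have hstep : ∀ (l : List Nat) (s : List (List Int)),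
          (l.foldl (pvStepA m i) s).length = s.length := by
        intro l
        induction l with
        | nil => intro s; rfl
        | cons a l ihl =>
          intro s
          rw [List.foldl_cons, ihl]
          rw [pvStepA]
          split
          · simp
          · rfl
      rw [pvSweepA, hstep]
    · rfl

theorem pvOuter (F m G : Nat) : ∀ (l : List Nat) (st : List (List Int)),
    st.length = G → (∀ i ∈ l, i < G) →
    l.foldl (fun st i => pvWhileA F m i st) st =
      l.foldl (fun res i => pvGroupB F m G res i) st := by
  intro l
  induction l with
  | nil => intro st _ _; rfl
  | cons i l ih =>
    intro st hlen hl
    simp only [List.foldl_cons]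
    rw [← pvGroup_sim F m G st i (hl i (List.mem_cons_self)) hlen]
    exact ih (pvWhileA F m i st) (by rw [pvWhileA_length, hlen]) (fun k hk => hl k (List.mem_cons_of_mem _ hk))

-- ===== VERDICT (by name: the statement is the Claim_ definition above) =====
theorem balanceGroups_spec : Claim_equal_balanceGroups := by
  intro groups _ _
  unfold Spec_balanceGroups balanceGroups balanceGroups_alt
  exact (pvOuter _ _ groups.length (List.range groups.length) groups rfl
    (fun i hi => List.mem_range.mp hi)).symm ▸ rfl
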